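-- pv_equiv track=rewrite | github.com/bryokim/alx-interview | 0x05-nqueens/0-nqueens.py | get_next_indexes
-- ===== SOURCE A (Python) =====
-- def get_next_indexes(current_index, n, forbidden=None):
--     """Get the next indexes on along the x-axis where queens are
--     non-attacking.
--
--     Args:
--         current_index (int): The current index where a queen has been placed.
--         n (int): number of queens. Same as size of chessboard.
--         forbidden (set, optional): Set of indexes where the queens
--             are attacking in the next row. Defaults to None.
--
--     Returns:
--         List: List of indexes where queens are non-attacking.
--     """
--     x = [j for j in range(current_index - 2, -1, -1)]
--     y = [j for j in range(current_index + 2, n)]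
--
--     x.reverse()
--     x.extend(y)
--
--     to_remove = []
--     if forbidden:
--         for j in x:
--             if j in forbidden:
--                 to_remove.append(j)
--
--     if to_remove:
--         for j in to_remove:
--             x.remove(j)
--
--     return x
-- ===== SOURCE B (Python) =====
-- def get_next_indexes(current_index, n, forbidden=None):
--     """Non-attacking next-row indexes via set difference plus one sort."""
--     allowed = set(range(current_index - 1)) | set(range(current_index + 2, n))
--     if forbidden:
--         allowed -= set(forbidden)
--     return sorted(allowed)
-- ===== Notes on version B (the rewrite author's own statement) =====
-- stated objective: idiomatic
-- what changed: Replaces A's two range-list constructions, collect-then-remove loops and list.remove scans with set algebra: union of the two candidate ranges as a set, one set difference against forbidden, and a final sort.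
import Mathlib
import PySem

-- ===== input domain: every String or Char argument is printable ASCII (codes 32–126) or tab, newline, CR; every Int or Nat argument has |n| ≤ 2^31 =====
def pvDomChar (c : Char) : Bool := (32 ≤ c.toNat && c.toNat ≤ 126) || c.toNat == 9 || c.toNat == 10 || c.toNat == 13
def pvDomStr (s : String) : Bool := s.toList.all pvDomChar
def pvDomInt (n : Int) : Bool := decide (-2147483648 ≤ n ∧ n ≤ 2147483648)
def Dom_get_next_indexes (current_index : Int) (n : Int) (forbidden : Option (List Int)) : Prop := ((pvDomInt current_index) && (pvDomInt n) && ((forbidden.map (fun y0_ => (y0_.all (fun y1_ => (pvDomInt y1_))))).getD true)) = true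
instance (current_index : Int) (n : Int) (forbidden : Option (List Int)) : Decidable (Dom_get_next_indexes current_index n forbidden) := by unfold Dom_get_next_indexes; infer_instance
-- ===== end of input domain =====

-- B replaces A's range-list building and collect-then-remove loops by set algebra
-- (union of the two candidate ranges, one set difference, a final sort); return value only.

-- ===== PORT A =====
def get_next_indexes (current_index : Int) (n : Int) (forbidden : Option (List Int)) : List Int :=
  let x := PySem.List.pyRange (current_index - 2) (-1) (-1)
  let y := PySem.List.pyRange (current_index + 2) n 1
  let x := x.reverse ++ y
  let to_remove : List Int :=
    match forbidden with
    | some f =>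
        if f ≠ [] then
          x.foldl (fun acc j => if f.contains j then acc ++ [j] else acc) []
        else []
    | none => []
  if to_remove ≠ [] then
    -- x.remove(j): every j in to_remove was collected from x (which has no duplicates),
    -- so remove? always succeeds; the getD default is unreachable
    to_remove.foldl (fun acc j => (PySem.List.remove? acc j).getD acc) x
  else x

-- ===== PORT B =====
def get_next_indexes_alt (current_index : Int) (n : Int) (forbidden : Option (List Int)) : List Int :=
  let allowed : PySem.Set Int :=
    PySem.Set.union (PySem.Set.ofList (PySem.List.pyRange 0 (current_index - 1) 1))
      (PySem.Set.ofList (PySem.List.pyRange (current_index + 2) n 1))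
  let allowed : PySem.Set Int :=
    match forbidden with
    | some f => if f ≠ [] then PySem.Set.diff allowed (PySem.Set.ofList f) else allowed
    | none => allowed
  PySem.List.sorted allowed (fun v => v) false

-- ===== PRECONDITION & SPEC =====
def Spec_get_next_indexes (current_index : Int) (n : Int) (forbidden : Option (List Int)) (out : List Int) : Prop := out = get_next_indexes_alt current_index n forbidden
instance (current_index : Int) (n : Int) (forbidden : Option (List Int)) (out : List Int) : Decidable (Spec_get_next_indexes current_index n forbidden out) := by unfold Spec_get_next_indexes; infer_instance

-- ===== CLAIM (what is proved, stated in full; the proofs are below) =====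
def Claim_equal_get_next_indexes : Prop := ∀ (current_index : Int) (n : Int) (forbidden : Option (List Int)), Dom_get_next_indexes current_index n forbidden → Spec_get_next_indexes current_index n forbidden (get_next_indexes current_index n forbidden)

-- ===== LEMMAS AND PROOFS =====

-- one x.remove(j) on a duplicate-free list is a filter (also when j is absent)
theorem remove_getD_eq_filter (xs : List Int) (t : Int) (hx : xs.Nodup) :
    (PySem.List.remove? xs t).getD xs = xs.filter (fun v => v != t) := by
  by_cases h : t ∈ xs
  · rw [PySem.List.remove?_eq_some_erase xs t h, Option.getD_some, hx.erase_eq_filter]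
  · rw [(PySem.List.remove?_eq_none_iff xs t).mpr h, Option.getD_none]
    exact (List.filter_eq_self.mpr (fun v hv => by
      simp only [bne_iff_ne, ne_eq]; rintro rfl; exact h hv)).symm

-- A's removal loop over a duplicate-free list filters out the members of ts
theorem foldl_remove_eq_filter (ts : List Int) :
    ∀ (xs : List Int), xs.Nodup →
      ts.foldl (fun acc j => (PySem.List.remove? acc j).getD acc) xs
        = xs.filter (fun v => !ts.contains v) := by
  induction ts with
  | nil => intro xs _; simp
  | cons t ts ih =>
      intro xs hx
      rw [List.foldl_cons, remove_getD_eq_filter xs t hx,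
        ih _ (hx.filter _), List.filter_filter]
      refine List.filter_congr (fun v _ => ?_)
      by_cases hvt : v = t <;> simp [hvt]

-- the concatenated candidate ranges are strictly increasing
theorem pairwise_candidates (current_index n : Int) :
    List.Pairwise (· < ·)
      (PySem.List.pyRange 0 (current_index - 1) 1 ++ PySem.List.pyRange (current_index + 2) n 1) := by
  rw [List.pairwise_append]
  refine ⟨PySem.List.pairwise_lt_pyRange_one _ _, PySem.List.pairwise_lt_pyRange_one _ _, ?_⟩
  intro a ha b hb
  rw [PySem.List.mem_pyRange_one] at ha hb
  omega

theorem nodup_candidates (current_index n : Int) :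
    (PySem.List.pyRange 0 (current_index - 1) 1 ++ PySem.List.pyRange (current_index + 2) n 1).Nodup :=
  (pairwise_candidates current_index n).imp ne_of_lt

-- A computes: filter the forbidden members out of the candidate list
theorem portA_eq_filter (current_index n : Int) (f : List Int) (hf : f ≠ []) :
    get_next_indexes current_index n (some f)
      = (PySem.List.pyRange 0 (current_index - 1) 1
          ++ PySem.List.pyRange (current_index + 2) n 1).filter (fun v => !f.contains v) := by
  unfold get_next_indexes
  have hrev : (PySem.List.pyRange (current_index - 2) (-1) (-1)).reverse
      = PySem.List.pyRange 0 (current_index - 1) 1 := by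
    rw [PySem.List.pyRange_neg_one_eq_reverse, List.reverse_reverse,
      show current_index - 2 + 1 = current_index - 1 by ring]
    norm_num
  simp only [hrev, ne_eq, hf, not_false_eq_true, if_true]
  rw [show (fun acc j => if f.contains j = true then acc ++ [j] else acc)
      = (fun acc j => if f.contains j = true then acc ++ [id j] else acc) by rfl,
    PySem.List.foldl_append_if, List.nil_append, List.map_id]
  by_cases htr : (PySem.List.pyRange 0 (current_index - 1) 1
      ++ PySem.List.pyRange (current_index + 2) n 1).filter (fun j => f.contains j) = []
  · rw [htr, if_neg (by simp)]
    symm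
    refine List.filter_eq_self.mpr (fun v hv => ?_)
    rw [List.filter_eq_nil_iff] at htr
    simpa using fun hvf => htr v hv (List.contains_iff_mem.mpr hvf)
  · rw [if_pos htr, foldl_remove_eq_filter _ _ (nodup_candidates current_index n)]
    refine List.filter_congr (fun v hv => ?_)
    rcases List.mem_append.mp hv with h | h <;> rw [PySem.List.mem_pyRange_one] at h
    · have h3 : ¬ (current_index + 2 ≤ v) := by omega
      simp [List.mem_filter, List.mem_append, PySem.List.mem_pyRange_one, h.1, h.2, h3]
    · have h3 : ¬ (v < current_index - 1) := by omega
      simp [List.mem_filter, List.mem_append, PySem.List.mem_pyRange_one, h.1, h.2, h3]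

-- sorting a sublist of the (strictly increasing) candidate list is the identity
theorem sorted_filter_candidates (current_index n : Int) (p : Int → Bool) :
    PySem.List.sorted ((PySem.List.pyRange 0 (current_index - 1) 1
        ++ PySem.List.pyRange (current_index + 2) n 1).filter p) (fun v => v)
      = (PySem.List.pyRange 0 (current_index - 1) 1
        ++ PySem.List.pyRange (current_index + 2) n 1).filter p :=
  PySem.List.sorted_eq_self_of_pairwise _ _
    (((pairwise_candidates current_index n).sublist List.filter_sublist).imp le_of_lt)

-- B's candidate set is literally the candidate list (both ranges are duplicate-free and disjoint)
theorem union_candidates (current_index n : Int) :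
    PySem.Set.union (PySem.Set.ofList (PySem.List.pyRange 0 (current_index - 1) 1))
        (PySem.Set.ofList (PySem.List.pyRange (current_index + 2) n 1))
      = PySem.List.pyRange 0 (current_index - 1) 1 ++ PySem.List.pyRange (current_index + 2) n 1 := by
  rw [PySem.Set.ofList_eq_self_of_nodup _ (PySem.List.nodup_pyRange_one _ _),
    PySem.Set.ofList_eq_self_of_nodup _ (PySem.List.nodup_pyRange_one _ _)]
  refine PySem.Set.update_eq_append_of_disjoint _ _ (PySem.List.nodup_pyRange_one _ _) ?_
  intro v hv hv'
  rw [PySem.List.mem_pyRange_one] at hv hv'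
  omega

-- ===== VERDICT (by name: the statement is the Claim_ definition above) =====
theorem get_next_indexes_spec : Claim_equal_get_next_indexes := by
  intro current_index n forbidden _
  unfold Spec_get_next_indexes
  have hnofilter :
      get_next_indexes current_index n none = get_next_indexes_alt current_index n none := by
    unfold get_next_indexes get_next_indexes_alt
    have hrev : (PySem.List.pyRange (current_index - 2) (-1) (-1)).reverse
        = PySem.List.pyRange 0 (current_index - 1) 1 := by
      rw [PySem.List.pyRange_neg_one_eq_reverse, List.reverse_reverse,
        show current_index - 2 + 1 = current_index - 1 by ring]
      norm_num
    simp only [hrev, union_candidates, ite_not]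
    exact (PySem.List.sorted_eq_self_of_pairwise _ _
      ((pairwise_candidates current_index n).imp le_of_lt)).symm
  match forbidden with
  | none => exact hnofilter
  | some f =>
      by_cases hf : f = []
      · subst hf
        -- both guards see the falsy empty set: same computation as forbidden = None
        unfold get_next_indexes get_next_indexes_alt at hnofilter ⊢
        simpa using hnofilter
      · rw [portA_eq_filter current_index n f hf]
        unfold get_next_indexes_alt
        simp only [union_candidates, hf, if_true, ne_eq, not_false_eq_true]
        rw [show PySem.Set.diff
              (PySem.List.pyRange 0 (current_index - 1) 1
                ++ PySem.List.pyRange (current_index + 2) n 1) (PySem.Set.ofList f)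
            = (PySem.List.pyRange 0 (current_index - 1) 1
                ++ PySem.List.pyRange (current_index + 2) n 1).filter
                  (fun v => !(PySem.Set.ofList f).contains v) from rfl,
          sorted_filter_candidates]
        refine (List.filter_congr (fun v _ => ?_)).symm
        by_cases hvf : v ∈ f
        · simp [PySem.Set.mem_ofList, hvf]
        · simp [PySem.Set.mem_ofList, hvf]
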